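-- pv_equiv track=rewrite | github.com/biswajeet1999/Data-structure-and-Algorithm | Python (Important interview questions)/SortingAndSearching/rotiPrataSpoj.py | canPrataMadeInGivenTime
-- ===== SOURCE A (Python) =====
-- def canPrataMadeInGivenTime(noOfPrata, cookRanks, targetTime):
--    timeTillNow = 0
--    counter = 1
--    cookIdx = 0
--    for i in range(1, noOfPrata + 1):
--       if timeTillNow + (counter*cookRanks[cookIdx]) <= targetTime:
--          timeTillNow += (counter*cookRanks[cookIdx])
--          counter += 1
--       else:
--          cookIdx += 1
--          if cookIdx == len(cookRanks):
--             return False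
--          counter = 1
--          timeTillNow = counter * cookRanks[cookIdx]
--          if timeTillNow > targetTime:
--             return False
--          counter += 1
--    return True
-- ===== SOURCE B (Python) =====
-- from math import isqrt
--
--
-- def pratas(rank, t, limit):
--     """How many pratas one cook turns out within t minutes, at most limit.
--     His 1st prata takes rank minutes, the 2nd 2*rank, the 3rd 3*rank, ...
--     If even the first prata does not fit he makes none; otherwise, for a
--     positive rank, c pratas take rank*c*(c+1)/2 minutes, so his output is
--     the largest c with that sum <= t, in closed form via integer sqrt."""
--     if t < rank:
--         return 0
--     if rank <= 0:
--         return limit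
--     return min(limit, (isqrt(8 * (t // rank) + 1) - 1) // 2)
--
--
-- def canPrataMadeInGivenTime(noOfPrata, cookRanks, targetTime):
--     """Dispatch the cooks in order: the first cook contributes what he can;
--     every further cook who is still needed must contribute at least one prata."""
--     if noOfPrata <= 0:
--         return True
--     remaining = noOfPrata - pratas(cookRanks[0], targetTime, noOfPrata)
--     for rank in cookRanks[1:]:
--         if remaining <= 0:
--             return True
--         made = pratas(rank, targetTime, remaining)
--         if made == 0:
--             return False
--         remaining -= made
--     return remaining <= 0
-- ===== Notes on version B (the rewrite author's own statement) =====
-- stated objective: faster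
-- what changed: Replaces the prata-by-prata simulation (one loop iteration per prata) with a per-cook loop: each cook's output within the time is computed in closed form via integer square root and subtracted from the remaining prata count; Pre_ excludes only the inputs (empty cook list with at least one prata wanted) on which A raises IndexError.
import Mathlib
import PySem

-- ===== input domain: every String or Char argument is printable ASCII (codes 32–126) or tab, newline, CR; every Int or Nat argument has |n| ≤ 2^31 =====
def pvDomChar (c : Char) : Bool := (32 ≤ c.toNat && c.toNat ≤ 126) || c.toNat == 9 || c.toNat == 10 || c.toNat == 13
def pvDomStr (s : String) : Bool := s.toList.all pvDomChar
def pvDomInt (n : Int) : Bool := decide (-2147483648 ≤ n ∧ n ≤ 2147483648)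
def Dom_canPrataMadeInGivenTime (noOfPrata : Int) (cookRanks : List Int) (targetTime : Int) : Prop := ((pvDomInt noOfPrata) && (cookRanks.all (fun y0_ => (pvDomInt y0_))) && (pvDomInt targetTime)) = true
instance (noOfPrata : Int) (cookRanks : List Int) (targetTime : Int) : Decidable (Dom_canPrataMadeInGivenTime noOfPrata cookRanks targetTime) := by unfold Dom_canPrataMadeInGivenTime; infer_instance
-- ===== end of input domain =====

-- B replaces A's prata-by-prata simulation by a per-cook loop that computes each cook's
-- output within the time in closed form (integer square root); proved equal on Pre_.

-- ===== PORT A =====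
-- one step per prata; state (timeTillNow, counter, cookIdx) exactly as in the Python loop.
-- pyGetD with default 0 stands for cookRanks[cookIdx]: under Pre_ the index is always in
-- range (Python would raise only for cookRanks = [] with a prata to make, excluded by Pre_).
def canPrataGoA (cookRanks : List Int) (targetTime : Int) :
    Nat → Int → Int → Nat → Bool
  | 0, _, _, _ => true
  | fuel + 1, timeTillNow, counter, cookIdx =>
    let r := PySem.List.pyGetD cookRanks (cookIdx : Int) 0
    if timeTillNow + counter * r ≤ targetTime then
      canPrataGoA cookRanks targetTime fuel (timeTillNow + counter * r) (counter + 1) cookIdx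
    else
      let cookIdx' := cookIdx + 1
      if cookIdx' = cookRanks.length then false
      else
        let t' := 1 * PySem.List.pyGetD cookRanks (cookIdx' : Int) 0
        if targetTime < t' then false
        else canPrataGoA cookRanks targetTime fuel t' 2 cookIdx'

def canPrataMadeInGivenTime (noOfPrata : Int) (cookRanks : List Int) (targetTime : Int) : Bool :=
  canPrataGoA cookRanks targetTime noOfPrata.toNat 0 1 0

-- ===== PORT B =====
-- Source B's capacity formula for a positive rank: (isqrt(8*(t//rank)+1)-1)//2;
-- math.isqrt = Nat.sqrt on its domain (the argument is ≥ 0 here)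
def capB (rank t : Int) : Int :=
  PySem.Int.floordiv (((8 * PySem.Int.floordiv t rank + 1).toNat.sqrt : Int) - 1) 2

-- Source B's pratas(rank, t, limit): how many pratas one cook turns out within t, at most limit
def pratasB (rank t limit : Int) : Int :=
  if t < rank then 0
  else if rank ≤ 0 then limit
  else min limit (capB rank t)

-- Source B's for-loop over cookRanks[1:] with accumulator `remaining`
def canPrataGoB (targetTime : Int) : List Int → Int → Bool
  | [], remaining => decide (remaining ≤ 0)
  | rank :: rest, remaining =>
    if remaining ≤ 0 then true
    else if pratasB rank targetTime remaining = 0 then false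
    else canPrataGoB targetTime rest (remaining - pratasB rank targetTime remaining)

def canPrataMadeInGivenTime_alt (noOfPrata : Int) (cookRanks : List Int) (targetTime : Int) : Bool :=
  if noOfPrata ≤ 0 then true
  else
    -- cookRanks[0] → pyGetD (in range under Pre_); cookRanks[1:] → drop 1
    canPrataGoB targetTime (cookRanks.drop 1)
      (noOfPrata - pratasB (PySem.List.pyGetD cookRanks 0 0) targetTime noOfPrata)

-- ===== PRECONDITION & SPEC =====
-- A indexes cookRanks[0] as soon as one prata is needed: it raises IndexError exactly
-- when cookRanks = [] and noOfPrata ≥ 1; Pre_ excludes exactly those inputs.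
def Pre_canPrataMadeInGivenTime (noOfPrata : Int) (cookRanks : List Int) (targetTime : Int) : Prop :=
  cookRanks ≠ [] ∨ noOfPrata ≤ 0
instance (noOfPrata : Int) (cookRanks : List Int) (targetTime : Int) : Decidable (Pre_canPrataMadeInGivenTime noOfPrata cookRanks targetTime) := by unfold Pre_canPrataMadeInGivenTime; infer_instance
def pvWitness_canPrataMadeInGivenTime : Int × List Int × Int := (3, [1, 2], 5)

def Spec_canPrataMadeInGivenTime (noOfPrata : Int) (cookRanks : List Int) (targetTime : Int) (out : Bool) : Prop := out = canPrataMadeInGivenTime_alt noOfPrata cookRanks targetTime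
instance (noOfPrata : Int) (cookRanks : List Int) (targetTime : Int) (out : Bool) : Decidable (Spec_canPrataMadeInGivenTime noOfPrata cookRanks targetTime out) := by unfold Spec_canPrataMadeInGivenTime; infer_instance

-- ===== CLAIM (what is proved, stated in full; the proofs are below) =====
def Claim_equal_canPrataMadeInGivenTime : Prop := ∀ (noOfPrata : Int) (cookRanks : List Int) (targetTime : Int), Dom_canPrataMadeInGivenTime noOfPrata cookRanks targetTime → Pre_canPrataMadeInGivenTime noOfPrata cookRanks targetTime → Spec_canPrataMadeInGivenTime noOfPrata cookRanks targetTime (canPrataMadeInGivenTime noOfPrata cookRanks targetTime)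

-- ===== LEMMAS AND PROOFS =====

-- goB returns true whenever no prata remains, whatever the cooks
lemma goB_nonpos (targetTime : Int) (l : List Int) (remaining : Int)
    (h : remaining ≤ 0) : canPrataGoB targetTime l remaining = true := by
  cases l with
  | nil => simp [canPrataGoB, h]
  | cons r rest => simp [canPrataGoB, h]

-- capB rank t is the largest c with rank*c*(c+1)/2 ≤ t, stated multiplied through by 2
lemma capB_spec (r T : Int) (hr : 0 < r) (hrT : r ≤ T) :
    1 ≤ capB r T ∧ r * (capB r T * (capB r T + 1)) ≤ 2 * T ∧
      2 * T < r * ((capB r T + 1) * (capB r T + 2)) := by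
  set q := PySem.Int.floordiv T r with hqdef
  have hq1 : 1 ≤ q := (PySem.Int.le_floordiv_iff_mul_le hr).mpr (by linarith)
  have hqr : q * r ≤ T := (PySem.Int.le_floordiv_iff_mul_le hr).mp le_rfl
  have hTq : T < (q + 1) * r := (PySem.Int.floordiv_lt_iff_lt_mul hr).mp (by omega)
  set n := (8 * q + 1).toNat with hndef
  have hn : (n : Int) = 8 * q + 1 := Int.toNat_of_nonneg (by omega)
  set s := Nat.sqrt n with hsdef
  have h1 : (s : Int) * s ≤ 8 * q + 1 := by
    have := Nat.sqrt_le' n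
    rw [pow_two] at this
    calc ((s : Int) * s) = ((s * s : Nat) : Int) := by push_cast; ring
    _ ≤ (n : Int) := by exact_mod_cast this
    _ = 8 * q + 1 := hn
  have h2 : 8 * q + 1 < ((s : Int) + 1) * ((s : Int) + 1) := by
    have := Nat.lt_succ_sqrt' n
    rw [pow_two] at this
    calc (8 * q + 1 : Int) = (n : Int) := hn.symm
    _ < ((s.succ * s.succ : Nat) : Int) := by exact_mod_cast this
    _ = ((s : Int) + 1) * ((s : Int) + 1) := by push_cast; ring
  have hs3 : 3 ≤ s := by
    have h9 : (9 : Nat) ≤ n := by omega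
    by_contra hlt
    push_neg at hlt
    have hs2 : (s : Int) ≤ 2 := by exact_mod_cast Nat.lt_succ_iff.mp hlt
    nlinarith [h2]
  have hcdef : capB r T = ((s : Int) - 1) / 2 := by
    rw [capB, ← hqdef, ← hndef, ← hsdef]
    exact PySem.Int.floordiv_eq_ediv_of_pos (by norm_num)
  set c := capB r T with hc
  have hpar : (s : Int) = 2 * c + 1 ∨ (s : Int) = 2 * c + 2 := by omega
  have hc1 : 1 ≤ c := by omega
  have key1 : c * (c + 1) ≤ 2 * q := by
    rcases hpar with h | h <;> nlinarith [h1]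
  have key2 : 2 * q < (c + 1) * (c + 2) := by
    rcases hpar with h | h <;> nlinarith [h2]
  refine ⟨hc1, ?_, ?_⟩
  · calc r * (c * (c + 1)) ≤ r * (2 * q) := by
          exact mul_le_mul_of_nonneg_left key1 hr.le
    _ = 2 * (q * r) := by ring
    _ ≤ 2 * T := by linarith
  · obtain ⟨e, he⟩ := Int.even_mul_succ_self (c + 1)
    have hE : (c + 1) * (c + 2) = e + e := by
      have : (c + 1) * (c + 1 + 1) = e + e := he
      linarith [this]
    have h2q2 : 2 * q + 2 ≤ (c + 1) * (c + 2) := by omega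
    calc 2 * T < 2 * ((q + 1) * r) := by linarith
    _ = (2 * q + 2) * r := by ring
    _ ≤ ((c + 1) * (c + 2)) * r := by
          exact mul_le_mul_of_nonneg_right h2q2 hr.le
    _ = r * ((c + 1) * (c + 2)) := by ring

-- value of pratasB for a positive rank that fits
lemma pratasB_pos (r T limit : Int) (hr : 0 < r) (hrT : r ≤ T) :
    pratasB r T limit = min limit (capB r T) := by
  rw [pratasB, if_neg (by omega), if_neg (by omega)]

-- the main simulation statement, as a predicate on the remaining fuel
-- state: cook cookRanks[idx], m pratas already made by it (counter = m+1),
-- timeTillNow t with 2t = r*m*(m+1); fuel pratas remain to be made.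
def Mstmt (cookRanks : List Int) (T : Int) (fuel : Nat) : Prop :=
  ∀ idx (m t : Int), ∀ hidx : idx < cookRanks.length,
    0 ≤ m → 2 * t = cookRanks[idx] * (m * (m + 1)) → cookRanks[idx] ≤ T →
    (0 < cookRanks[idx] → m ≤ capB cookRanks[idx] T) →
    canPrataGoA cookRanks T fuel t (m + 1) idx =
      (if cookRanks[idx] ≤ 0 then true
       else if (fuel : Int) ≤ capB cookRanks[idx] T - m then true
       else canPrataGoB T (cookRanks.drop (idx + 1))
              ((fuel : Int) - (capB cookRanks[idx] T - m)))

-- A's cook-switch step (the else branch of its loop body) equals B's handling of the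
-- remaining cooks, given the simulation statement at the remaining fuel
lemma switch_eq (cookRanks : List Int) (T : Int) (f idx : Nat)
    (hM : Mstmt cookRanks T f) (hidx : idx < cookRanks.length) :
    (if idx + 1 = cookRanks.length then false
     else if T < 1 * PySem.List.pyGetD cookRanks ((idx + 1 : Nat) : Int) 0 then false
     else canPrataGoA cookRanks T f (1 * PySem.List.pyGetD cookRanks ((idx + 1 : Nat) : Int) 0) 2 (idx + 1))
    = canPrataGoB T (cookRanks.drop (idx + 1)) ((f : Int) + 1) := by
  by_cases hend : idx + 1 = cookRanks.length
  · rw [if_pos hend, List.drop_of_length_le (by omega)]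
    simp [canPrataGoB]
  · have hidx' : idx + 1 < cookRanks.length := by omega
    rw [if_neg hend]
    have hget' : PySem.List.pyGetD cookRanks ((idx + 1 : Nat) : Int) 0 = cookRanks[idx + 1] :=
      PySem.List.pyGetD_ofNat cookRanks (idx + 1) 0 hidx'
    have hdrop : cookRanks.drop (idx + 1) = cookRanks[idx + 1] :: cookRanks.drop (idx + 2) :=
      List.drop_eq_getElem_cons hidx'
    set r' := cookRanks[idx + 1] with hr'def
    rw [hget', hdrop]
    have hpos : ¬ ((f : Int) + 1 ≤ 0) := by omega
    by_cases hr'T : T < 1 * r'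
    · -- next cook cannot even start: both sides say false
      rw [if_pos hr'T]
      rw [one_mul] at hr'T
      simp only [canPrataGoB]
      rw [if_neg hpos, if_pos (by rw [pratasB, if_pos hr'T])]
    · push_neg at hr'T
      rw [one_mul] at hr'T
      rw [if_neg (by rw [one_mul]; omega)]
      have hIH := hM (idx + 1) 1 (1 * r') hidx' (by omega) (by rw [← hr'def]; ring)
        (by rw [← hr'def]; exact hr'T)
      by_cases hr'sgn : r' ≤ 0
      · -- nonpositive rank: the cook absorbs everything; both sides true
        have h2 := hIH (by rw [← hr'def]; intro h; omega)
        rw [← hr'def] at h2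
        rw [(by norm_num : (2 : Int) = 1 + 1), h2, if_pos hr'sgn]
        have hp : pratasB r' T ((f : Int) + 1) = (f : Int) + 1 := by
          rw [pratasB, if_neg (by omega), if_pos hr'sgn]
        simp only [canPrataGoB]
        rw [if_neg hpos, hp, if_neg (by omega), goB_nonpos _ _ _ (by omega)]
      · push_neg at hr'sgn
        obtain ⟨hc1', _, _⟩ := capB_spec r' T hr'sgn hr'T
        have h2 := hIH (by rw [← hr'def]; exact fun _ => hc1')
        rw [← hr'def] at h2
        simp only [show idx + 1 + 1 = idx + 2 from rfl] at h2
        rw [(by norm_num : (2 : Int) = 1 + 1), h2,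
          if_neg (show ¬ r' ≤ 0 by omega)]
        have hp : pratasB r' T ((f : Int) + 1) = min ((f : Int) + 1) (capB r' T) :=
          pratasB_pos r' T _ hr'sgn hr'T
        simp only [canPrataGoB]
        rw [if_neg hpos, hp]
        by_cases hfin : (f : Int) ≤ capB r' T - 1
        · have hmin : min ((f : Int) + 1) (capB r' T) = (f : Int) + 1 :=
            min_eq_left (by omega)
          rw [if_pos hfin, hmin, if_neg (by omega), goB_nonpos _ _ _ (by omega)]
        · have hmin : min ((f : Int) + 1) (capB r' T) = capB r' T :=
            min_eq_right (by omega)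
          rw [if_neg hfin, hmin, if_neg (by omega)]
          congr 1
          omega

-- A's loop, run from a consistent mid-cook state, computes what B computes from the
-- corresponding per-cook state
lemma goA_eq (cookRanks : List Int) (T : Int) : ∀ fuel, Mstmt cookRanks T fuel := by
  intro fuel
  induction fuel with
  | zero =>
    intro idx m t hidx hm ht hrT hcap
    by_cases hr : cookRanks[idx] ≤ 0
    · simp [canPrataGoA, hr]
    · have := hcap (by omega)
      simp only [canPrataGoA, Nat.cast_zero]
      rw [if_neg hr, if_pos (by omega)]
  | succ f IH =>
    intro idx m t hidx hm ht hrT hcap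
    have hget : PySem.List.pyGetD cookRanks (idx : Int) 0 = cookRanks[idx] :=
      PySem.List.pyGetD_ofNat cookRanks idx 0 hidx
    set r := cookRanks[idx] with hrdef
    by_cases hr : r ≤ 0
    · -- nonpositive-rank cook: step condition always holds, runs to fuel exhaustion = true
      have h2eq : 2 * (t + (m + 1) * r) = r * ((m + 1) * (m + 2)) := by linear_combination ht
      have h2le : (2 : Int) ≤ (m + 1) * (m + 2) := by nlinarith
      have hcond : t + (m + 1) * r ≤ T := by
        have := mul_le_mul_of_nonpos_left h2le hr
        linarith
      have ht' : 2 * (t + (m + 1) * r) = r * ((m + 1) * (m + 1 + 1)) := by linear_combination ht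
      have hIH := IH idx (m + 1) (t + (m + 1) * r) hidx (by omega) ht' hrT (by intro h; omega)
      rw [← hrdef] at hIH
      simp only [canPrataGoA, hget, ← hrdef]
      rw [if_pos hcond]
      have : canPrataGoA cookRanks T f (t + (m + 1) * r) (m + 1 + 1) idx = true := by
        rw [hIH, if_pos hr]
      rw [this, if_pos hr]
    · -- positive-rank cook of capacity c ≥ 1
      push_neg at hr
      obtain ⟨hc1, hcle, hclt⟩ := capB_spec r T hr hrT
      set c := capB r T with hcdef
      have hmc : m ≤ c := hcap hr
      by_cases hmlt : m < c
      · -- the cook makes one more prata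
        have hmono : (m + 1) * (m + 2) ≤ c * (c + 1) := by nlinarith
        have hcond : t + (m + 1) * r ≤ T := by nlinarith
        have ht' : 2 * (t + (m + 1) * r) = r * ((m + 1) * (m + 1 + 1)) := by linear_combination ht
        have hIH := IH idx (m + 1) (t + (m + 1) * r) hidx (by omega) ht' hrT
          (by rw [← hrdef, ← hcdef]; intro h; omega)
        rw [← hrdef, ← hcdef] at hIH
        simp only [canPrataGoA, hget, ← hrdef]
        rw [if_pos hcond, hIH]
        simp only [if_neg (show ¬ r ≤ 0 by omega)]
        by_cases hfin : (f : Int) ≤ c - (m + 1)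
        · rw [if_pos hfin, if_pos (show ((f + 1 : Nat) : Int) ≤ c - m by push_cast; omega)]
        · rw [if_neg hfin, if_neg (show ¬ ((f + 1 : Nat) : Int) ≤ c - m by push_cast; omega)]
          congr 1
          push_cast
          omega
      · -- m = c: the cook is full, A switches to the next cook
        have hmeq : m = c := by omega
        subst hmeq
        have hcond : ¬ (t + (c + 1) * r ≤ T) := by
          intro h
          have hx : r * ((c + 1) * (c + 2)) = 2 * t + 2 * ((c + 1) * r) := by
            linear_combination -ht
          linarith
        simp only [canPrataGoA, hget, ← hrdef]
        rw [if_neg hcond]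
        rw [if_neg (show ¬ r ≤ 0 by omega),
          if_neg (show ¬ ((f + 1 : Nat) : Int) ≤ c - c by push_cast; omega)]
        rw [switch_eq cookRanks T f idx IH hidx]
        congr 1
        push_cast
        ring

-- ===== VERDICT =====

theorem canPrataMadeInGivenTime_spec : Claim_equal_canPrataMadeInGivenTime := by
  intro n cookRanks T _ hpre
  unfold Spec_canPrataMadeInGivenTime canPrataMadeInGivenTime canPrataMadeInGivenTime_alt
  by_cases hn : n ≤ 0
  · have : n.toNat = 0 := by omega
    rw [this, if_pos hn]
    rfl
  · push_neg at hn
    rw [if_neg (by omega)]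
    obtain ⟨r, rest, hcr⟩ : ∃ r rest, cookRanks = r :: rest := by
      rcases hpre with h | h
      · cases cookRanks with
        | nil => exact absurd rfl h
        | cons r rest => exact ⟨r, rest, rfl⟩
      · omega
    subst hcr
    obtain ⟨f, hf⟩ : ∃ f, n.toNat = f + 1 := ⟨n.toNat - 1, by omega⟩
    have hfn : (f : Int) + 1 = n := by omega
    have hidx0 : 0 < (r :: rest).length := by simp
    have hget0 : PySem.List.pyGetD (r :: rest) ((0 : Nat) : Int) 0 = r :=
      PySem.List.pyGetD_ofNat (r :: rest) 0 0 hidx0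
    have hget0' : PySem.List.pyGetD (r :: rest) (0 : Int) 0 = r := by
      simpa using hget0
    have hdrop1 : (r :: rest).drop 1 = rest := rfl
    by_cases hrT : r ≤ T
    · -- first cook can start: run the main lemma from the fresh state m = 0, t = 0
      have hmain := goA_eq (r :: rest) T (f + 1) 0 0 0 hidx0 le_rfl (by simp) hrT
      by_cases hrsgn : r ≤ 0
      · have h1 := hmain (by simp only [List.getElem_cons_zero]; intro h; omega)
        simp only [List.getElem_cons_zero] at h1
        rw [hf, (by norm_num : (1 : Int) = 0 + 1), h1, if_pos hrsgn]
        have hp : pratasB r T n = n := by rw [pratasB, if_neg (by omega), if_pos hrsgn]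
        rw [hget0', hp, hdrop1, goB_nonpos _ _ _ (by omega)]
      · push_neg at hrsgn
        obtain ⟨hc1, _, _⟩ := capB_spec r T hrsgn hrT
        have h1 := hmain (by simp only [List.getElem_cons_zero]; intro h; omega)
        simp only [List.getElem_cons_zero, List.drop_succ_cons, List.drop_zero, sub_zero,
          Nat.cast_add, Nat.cast_one] at h1
        rw [hf, (by norm_num : (1 : Int) = 0 + 1), h1, if_neg (show ¬ r ≤ 0 by omega)]
        rw [hget0', pratasB_pos r T n hrsgn hrT, hdrop1]
        by_cases hfin : (f : Int) + 1 ≤ capB r T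
        · rw [if_pos (by omega), goB_nonpos _ _ _ (by omega)]
        · rw [if_neg (by omega)]
          congr 1
          omega
    · -- first cook cannot even start: A's first iteration takes the else branch; B
      -- assigns him no pratas and moves to the rest of the cooks
      push_neg at hrT
      rw [hf]
      simp only [canPrataGoA, hget0]
      rw [if_neg (by omega)]
      have hsw := switch_eq (r :: rest) T f 0 (goA_eq (r :: rest) T f) hidx0
      simp only [List.drop_succ_cons, List.drop_zero] at hsw
      rw [hsw, hfn]
      have hp : pratasB r T n = 0 := by rw [pratasB, if_pos hrT]
      rw [hget0', hp, hdrop1, sub_zero]
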